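-- pv_equiv track=rewrite | github.com/nguyenngochuy91/programming | interview/arrays.py | findVertical
-- ===== SOURCE A (Python) =====
-- def findVertical(crossword):
--     d ={}
--     row = len(crossword)
--     col = len(crossword[0])
--     for c in range(col):
--         r = 0
--         found = False
--         length = 0
--         while r<row:
--             if crossword[r][c]=="-":
--                 if not found:
--                     start= (r,c)
--                 length+=1
--                 found = True
--             else:
--                 if found: # we are done with 1 segment
--                     if length not in d:
--                         d[length]= []
--                     d[length].append(start)
--                     length=0
--                 found = False
--             r+=1
--         if found:
--             if length not in d:
--                 d[length]= []
--             d[length].append(start)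
--     if 1 in d:
--         d.pop(1)
--     return d
-- ===== SOURCE B (Python) =====
-- def findVertical(crossword):
--     rows = len(crossword)
--     cols = len(crossword[0])
--     # pass 1 (bottom-up, row-major): table[r][c] = length of the '-' run starting at (r,c) going down
--     up = [0] * cols
--     table = []
--     for line in reversed(crossword):
--         up = [up[c] + 1 if line[c] == '-' else 0 for c in range(cols)]
--         table.append(up)
--     table.reverse()
--     # pass 2 (column-major): a segment starts where the run above has length 0; keep lengths > 1
--     d = {}
--     for c in range(cols):
--         for r in range(rows):
--             if table[r][c] > 1 and (r == 0 or table[r - 1][c] == 0):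
--                 d.setdefault(table[r][c], []).append((r, c))
--     return d
-- ===== Notes on version B (the rewrite author's own statement) =====
-- stated objective: alternative
-- what changed: A detects segments with a per-column found/length/start state machine and pops key 1 at the end; B is a two-stage dynamic program: a bottom-up row-major pass builds a table of downward '-'-run lengths, then a column-major pass collects the cells where a run starts (table value above is 0) and the run length exceeds 1.
import Mathlib
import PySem

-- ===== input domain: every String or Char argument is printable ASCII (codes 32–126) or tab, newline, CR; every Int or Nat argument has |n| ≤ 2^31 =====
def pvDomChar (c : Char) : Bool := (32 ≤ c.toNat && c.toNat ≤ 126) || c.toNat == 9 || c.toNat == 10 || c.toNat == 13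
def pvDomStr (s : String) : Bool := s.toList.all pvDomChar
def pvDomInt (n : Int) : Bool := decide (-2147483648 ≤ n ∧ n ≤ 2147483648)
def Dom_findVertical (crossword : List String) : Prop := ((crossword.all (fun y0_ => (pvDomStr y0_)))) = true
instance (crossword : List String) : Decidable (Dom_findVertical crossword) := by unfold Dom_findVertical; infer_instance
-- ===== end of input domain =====

-- B replaces A's per-cell found/length/start state machine (plus a final pop of key 1) by a
-- two-stage DP: a bottom-up row-major pass tabulating downward '-'-run lengths, then a
-- column-major collection of run starts longer than 1 (alternative decomposition, same cost).


-- ===== PORT A =====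
-- crossword[r][c]; Pre_ guarantees both indexings are in range, the default is never used there
def pvCellA (crossword : List String) (r : Int) (c : Int) : Char :=
  (((PySem.List.pyGet? crossword r).bind (fun s => PySem.Str.pyGet? s c))).getD ' '

-- `if length not in d: d[length] = []` then `d[length].append(start)`
def pvAppendSeg (d : PySem.Dict Int (List (Int × Int))) (len : Int) (start : Int × Int) :
    PySem.Dict Int (List (Int × Int)) :=
  let d := if d.contains len then d else d.insert len []
  d.modify len [] (fun l => l ++ [start])

-- one step of A's inner `while r < row` body; state = (d, found, length, start)
def pvStepA (crossword : List String) (c : Int)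
    (st : PySem.Dict Int (List (Int × Int)) × Bool × Int × (Int × Int)) (r : Int) :
    PySem.Dict Int (List (Int × Int)) × Bool × Int × (Int × Int) :=
  match st with
  | (d, found, len, start) =>
    if pvCellA crossword r c == '-' then
      let start := if !found then (r, c) else start
      (d, true, len + 1, start)
    else if found then (pvAppendSeg d len start, false, 0, start)
    else (d, false, len, start)

def findVertical (crossword : List String) : List (Int × List (Int × Int)) :=
  let row : Int := crossword.length
  let col : Int := PySem.Str.len ((PySem.List.pyGet? crossword 0).getD "")
  let d := (PySem.List.pyRange 0 col 1).foldl (fun d c =>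
      match (PySem.List.pyRange 0 row 1).foldl (pvStepA crossword c) (d, false, (0 : Int), ((0, 0) : Int × Int)) with
      | (d, found, len, start) => if found then pvAppendSeg d len start else d)
    PySem.Dict.empty
  let d := if d.contains 1 then d.erase 1 else d
  d.items

-- ===== PORT B =====
-- `row[c]` on an int list (always in range inside Pre_)
def pvLk1 (row : List Int) (c : Int) : Int := PySem.List.pyGetD row c 0

-- the list comprehension `[up[c] + 1 if line[c] == '-' else 0 for c in range(cols)]`
def pvUpRow (line : String) (cols : Int) (up : List Int) : List Int :=
  (PySem.List.pyRange 0 cols 1).map (fun c =>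
    if (PySem.Str.pyGet? line c).getD ' ' == '-' then pvLk1 up c + 1 else 0)

-- `table[r][c]`
def pvLk (table : List (List Int)) (r c : Int) : Int := pvLk1 (PySem.List.pyGetD table r []) c

-- body of B's collection loop over r
def pvBodyB (table : List (List Int)) (c : Int)
    (d : PySem.Dict Int (List (Int × Int))) (r : Int) : PySem.Dict Int (List (Int × Int)) :=
  if 1 < pvLk table r c ∧ (r = 0 ∨ pvLk table (r - 1) c = 0) then
    d.modify (pvLk table r c) [] (fun l => l ++ [(r, c)])
  else d

def findVertical_alt (crossword : List String) : List (Int × List (Int × Int)) :=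
  let rows : Int := crossword.length
  let cols : Int := PySem.Str.len ((PySem.List.pyGet? crossword 0).getD "")
  -- pass 1: for line in reversed(crossword): up = [...]; table.append(up) — then table.reverse()
  let st := crossword.reverse.foldl (fun (st : List Int × List (List Int)) line =>
      let u := pvUpRow line cols st.1
      (u, st.2 ++ [u])) (List.replicate cols.toNat 0, ([] : List (List Int)))
  let table := st.2.reverse
  -- pass 2: collect run starts with length > 1, column-major
  ((PySem.List.pyRange 0 cols 1).foldl (fun d c =>
      (PySem.List.pyRange 0 rows 1).foldl (pvBodyB table c) d)
    PySem.Dict.empty).items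

-- ===== PRECONDITION & SPEC =====
-- Pre_ excludes exactly the inputs where Python A raises IndexError: the empty grid
-- (crossword[0]) and grids with a row shorter than row 0 (crossword[r][c]).
def Pre_findVertical (crossword : List String) : Prop :=
  crossword ≠ [] ∧ ∀ s ∈ crossword, PySem.Str.len (crossword.headD "") ≤ PySem.Str.len s
instance (crossword : List String) : Decidable (Pre_findVertical crossword) := by
  unfold Pre_findVertical; infer_instance
def pvWitness_findVertical : List String := ["-x-", "--x", "-x-"]
def Spec_findVertical (crossword : List String) (out : List (Int × List (Int × Int))) : Prop := out = findVertical_alt crossword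
instance (crossword : List String) (out : List (Int × List (Int × Int))) : Decidable (Spec_findVertical crossword out) := by unfold Spec_findVertical; infer_instance

-- ===== CLAIM (what is proved, stated in full; the proofs are below) =====
def Claim_equal_findVertical : Prop := ∀ (crossword : List String), Dom_findVertical crossword → Pre_findVertical crossword → Spec_findVertical crossword (findVertical crossword)

-- ===== LEMMAS AND PROOFS =====

-- the column read through the same per-cell expression both ports use
def pvColumn (crossword : List String) (c : Int) : List Char :=
  crossword.map (fun s => (PySem.Str.pyGet? s c).getD ' ')

-- A's inner-loop step as a function of the character read (pvStepA reads it from the grid)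
def pvStepCh (c : Int) (st : PySem.Dict Int (List (Int × Int)) × Bool × Int × (Int × Int))
    (r : Int) (ch : Char) :
    PySem.Dict Int (List (Int × Int)) × Bool × Int × (Int × Int) :=
  match st with
  | (d, found, len, start) =>
    if ch == '-' then
      let start := if !found then (r, c) else start
      (d, true, len + 1, start)
    else if found then (pvAppendSeg d len start, false, 0, start)
    else (d, false, len, start)

lemma pvStepA_eq (cw : List String) (c : Int) (st) (r : Int) :
    pvStepA cw c st r = pvStepCh c st r (pvCellA cw r c) := rfl

-- A's inner while-loop as structural recursion over the column characters
def pvScanAL (c : Int) (st : PySem.Dict Int (List (Int × Int)) × Bool × Int × (Int × Int))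
    (r : Int) (cs : List Char) :
    PySem.Dict Int (List (Int × Int)) × Bool × Int × (Int × Int) :=
  match cs with
  | [] => st
  | ch :: rest => pvScanAL c (pvStepCh c st r ch) (r + 1) rest

def pvFlush (st : PySem.Dict Int (List (Int × Int)) × Bool × Int × (Int × Int)) :
    PySem.Dict Int (List (Int × Int)) :=
  match st with
  | (d, found, len, start) => if found then pvAppendSeg d len start else d

-- length of the maximal run of ch at the head of cs
def pvRunLen (ch : Char) (cs : List Char) : Nat :=
  match cs with
  | [] => 0
  | x :: rest => if x == ch then pvRunLen ch rest + 1 else 0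

-- run-at-a-time scan of a column: the common intermediate both ports are reduced to
def pvScanRuns (c : Int) (d : PySem.Dict Int (List (Int × Int))) (r : Int) (cs : List Char) :
    PySem.Dict Int (List (Int × Int)) :=
  match cs with
  | [] => d
  | ch :: rest =>
    let k : Nat := pvRunLen ch rest + 1
    let d := if ch == '-' && decide (1 < k) then d.modify (k : Int) [] (fun l => l ++ [(r, c)]) else d
    pvScanRuns c d (r + (k : Int)) (rest.drop (k - 1))
termination_by cs.length
decreasing_by simp

-- raw association-list facts used for the Dict equalities
lemma aux_find?_filter {α : Type} (l : List α) (p q : α → Bool) :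
    (l.filter p).find? q = l.find? (fun a => p a && q a) := by
  induction l with
  | nil => rfl
  | cons a t ih =>
    rw [List.filter_cons]
    by_cases hp : p a
    · by_cases hq : q a <;> simp [hp, hq, ih]
    · simp [hp, ih]

lemma aux_any_filter (l : List (Int × List (Int × Int))) (k : Int) (hk : k ≠ 1) :
    (l.filter (fun p => !(p.1 == (1:Int)))).any (fun p => p.1 == k) = l.any (fun p => p.1 == k) := by
  rw [List.any_filter]
  congr 1
  funext a
  by_cases h : a.1 = k <;> simp [h, hk]

lemma aux_find_filter (l : List (Int × List (Int × Int))) (k : Int) (hk : k ≠ 1) :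
    (l.filter (fun p => !(p.1 == (1:Int)))).find? (fun p => p.1 == k) = l.find? (fun p => p.1 == k) := by
  rw [aux_find?_filter]
  congr 1
  funext a
  by_cases h : a.1 = k <;> simp [h, hk]

lemma aux_filter_map (l : List (Int × List (Int × Int))) (k : Int) (v : List (Int × Int)) :
    (l.map (fun p => if p.1 = k then (k, v) else p)).filter (fun p => !(p.1 == (1:Int)))
      = (l.filter (fun p => !(p.1 == (1:Int)))).map (fun p => if p.1 = k then (k, v) else p) := by
  rw [List.filter_map]
  congr 1
  apply List.filter_congr
  intro p _
  by_cases h : p.1 = k <;> simp [Function.comp, h]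

lemma aux_filter_map_one (l : List (Int × List (Int × Int))) (w : List (Int × Int)) :
    (l.map (fun p => if p.1 = (1:Int) then ((1:Int), w) else p)).filter (fun p => !(p.1 == (1:Int)))
      = l.filter (fun p => !(p.1 == (1:Int))) := by
  rw [List.filter_map]
  rw [List.filter_congr (q := fun p => !(p.1 == (1:Int)))
    (fun p _ => by by_cases h : p.1 = 1 <;> simp [Function.comp, h])]
  rw [List.map_congr_left (g := fun p => p)
    (fun p hp => by
      have h := (List.mem_filter.mp hp).2
      simp only [Bool.not_eq_eq_eq_not, Bool.not_true, beq_eq_false_iff_ne, ne_eq] at h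
      simp [h])]
  simp

-- erase 1 commutes with a modify at a key ≠ 1
lemma erase_modify_comm (d : PySem.Dict Int (List (Int × Int))) (k : Int) (hk : k ≠ 1)
    (f : List (Int × Int) → List (Int × Int)) :
    (d.modify k [] f).erase 1 = (d.erase 1).modify k [] f := by
  obtain ⟨l⟩ := d
  simp only [PySem.Dict.modify, PySem.Dict.insert, PySem.Dict.erase, PySem.Dict.getD,
    PySem.Dict.get?, PySem.Dict.contains]
  rw [aux_any_filter l k hk, aux_find_filter l k hk]
  by_cases hc : l.any (fun p => p.1 == k)
  · simp only [hc, if_true, beq_iff_eq]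
    congr 1
    exact aux_filter_map l k _
  · simp [hc, List.filter_append, hk]

-- modify at key 1 disappears under erase 1
lemma erase_modify_one (d : PySem.Dict Int (List (Int × Int)))
    (f : List (Int × Int) → List (Int × Int)) :
    (d.modify 1 [] f).erase 1 = d.erase 1 := by
  obtain ⟨l⟩ := d
  simp only [PySem.Dict.modify, PySem.Dict.insert, PySem.Dict.erase, PySem.Dict.getD,
    PySem.Dict.get?, PySem.Dict.contains]
  by_cases hc : l.any (fun p => p.1 == (1:Int))
  · simp only [hc, if_true, beq_iff_eq]
    congr 1
    exact aux_filter_map_one l _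
  · simp [hc, List.filter_append]

lemma erase_of_not_contains (d : PySem.Dict Int (List (Int × Int)))
    (h : d.contains 1 = false) : d.erase 1 = d := by
  obtain ⟨l⟩ := d
  have h' : ∀ p ∈ l, (p.1 == (1:Int)) = false := by
    intro p hp
    by_contra hne
    simp only [Bool.not_eq_false] at hne
    have hany : l.any (fun p => p.1 == (1:Int)) = true := List.any_eq_true.mpr ⟨p, hp, hne⟩
    rw [show (PySem.Dict.contains ⟨l⟩ (1:Int)) = l.any (fun p => p.1 == (1:Int)) from rfl, hany] at h
    exact absurd h (by simp)
  show PySem.Dict.mk (l.filter fun p => !(p.1 == (1:Int))) = ⟨l⟩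
  congr 1
  exact List.filter_eq_self.mpr (fun p hp => by simp [h' p hp])

-- `if length not in d: d[length]=[]; d[length].append(x)` IS d.modify length [] (· ++ [x])
lemma appendSeg_eq_modify (d : PySem.Dict Int (List (Int × Int))) (k : Int) (x : Int × Int) :
    pvAppendSeg d k x = d.modify k [] (fun l => l ++ [x]) := by
  unfold pvAppendSeg
  by_cases hc : d.contains k
  · simp [hc]
  · simp only [hc, Bool.false_eq_true, if_false]
    rw [PySem.Dict.modify, PySem.Dict.modify, PySem.Dict.getD_insert_self,
      PySem.Dict.insert_insert_self, PySem.Dict.getD_of_not_contains _ _ (by simp [hc])]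

-- the combined effect under erase 1, for a run of length k ≥ 1
lemma erase_appendSeg (d : PySem.Dict Int (List (Int × Int))) (k : Nat) (hk : 1 ≤ k) (x : Int × Int) :
    (pvAppendSeg d (k : Int) x).erase 1 =
      if 1 < k then (d.erase 1).modify (k : Int) [] (fun l => l ++ [x]) else d.erase 1 := by
  rw [appendSeg_eq_modify]
  by_cases h : 1 < k
  · rw [if_pos h, erase_modify_comm _ _ (by omega)]
  · have : k = 1 := by omega
    subst this
    simpa using erase_modify_one d (fun l => l ++ [x])

-- run-length facts
lemma take_pvRunLen (ch : Char) (cs : List Char) :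
    cs.take (pvRunLen ch cs) = List.replicate (pvRunLen ch cs) ch := by
  induction cs with
  | nil => simp [pvRunLen]
  | cons x t ih =>
    by_cases h : x = ch
    · simp [pvRunLen, h, List.replicate_succ, ih]
    · simp [pvRunLen, h]

lemma drop_pvRunLen_ne (ch : Char) (cs : List Char) {x : Char} {t : List Char}
    (h : cs.drop (pvRunLen ch cs) = x :: t) : x ≠ ch := by
  induction cs generalizing x t with
  | nil => simp [pvRunLen] at h
  | cons y ys ih =>
    by_cases hy : y = ch
    · simp [pvRunLen, hy] at h
      exact ih h
    · simp [pvRunLen, hy] at h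
      rw [← h.1]; exact hy

-- skipping a run of dashes accumulates length and row
lemma scanAL_dashes (c : Int) (m : Nat) :
    ∀ (rest : List Char) (d : PySem.Dict Int (List (Int × Int))) (j r : Int) (s : Int × Int),
    pvScanAL c (d, true, j, s) r (List.replicate m '-' ++ rest)
      = pvScanAL c (d, true, j + m, s) (r + m) rest := by
  induction m with
  | zero => intro rest d j r s; simp
  | succ m ih =>
    intro rest d j r s
    rw [List.replicate_succ, List.cons_append, pvScanAL]
    have hstep : pvStepCh c (d, true, j, s) r '-' = (d, true, j + 1, s) := rfl
    rw [hstep, ih]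
    have e1 : j + 1 + (m : Int) = j + ((m + 1 : Nat) : Int) := by push_cast; ring
    have e2 : r + 1 + (m : Int) = r + ((m + 1 : Nat) : Int) := by push_cast; ring
    rw [e1, e2]

-- skipping a run of non-dashes in the not-found state changes nothing but the row
lemma scanAL_skip (c : Int) (pre : List Char) (hpre : ∀ x ∈ pre, x ≠ '-') :
    ∀ (rest : List Char) (d : PySem.Dict Int (List (Int × Int))) (r : Int) (s : Int × Int),
    pvScanAL c (d, false, 0, s) r (pre ++ rest)
      = pvScanAL c (d, false, 0, s) (r + pre.length) rest := by
  induction pre with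
  | nil => intro rest d r s; simp
  | cons x t ih =>
    intro rest d r s
    have hx : x ≠ '-' := hpre x (by simp)
    rw [List.cons_append, pvScanAL]
    have hstep : pvStepCh c (d, false, 0, s) r x = (d, false, 0, s) := by
      simp [pvStepCh, hx]
    rw [hstep, ih (fun y hy => hpre y (by simp [hy]))]
    have e : r + 1 + (t.length : Int) = r + ((x :: t).length : Int) := by
      simp only [List.length_cons]; push_cast; ring
    rw [e]

-- flushing a finished segment on a non-dash character commutes into the not-found state
lemma scanAL_flushstep (c : Int) (ch2 : Char) (h : ch2 ≠ '-') (t2 : List Char)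
    (d : PySem.Dict Int (List (Int × Int))) (len : Int) (st : Int × Int) (r : Int) :
    pvScanAL c (d, true, len, st) r (ch2 :: t2)
      = pvScanAL c (pvAppendSeg d len st, false, 0, st) r (ch2 :: t2) := by
  simp [pvScanAL, pvStepCh, h]

-- A's state-machine scan of one column equals the run-at-a-time scan, under erase 1
lemma core_column (n : Nat) : ∀ (cs : List Char), cs.length ≤ n →
    ∀ (c r : Int) (d : PySem.Dict Int (List (Int × Int))) (s : Int × Int),
    (pvFlush (pvScanAL c (d, false, 0, s) r cs)).erase 1 = pvScanRuns c (d.erase 1) r cs := by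
  induction n with
  | zero =>
    intro cs hcs c r d s
    have hnil : cs = [] := List.eq_nil_of_length_eq_zero (Nat.le_zero.mp hcs)
    subst hnil
    simp [pvScanAL, pvScanRuns, pvFlush]
  | succ n ih =>
    intro cs hcs c r d s
    match cs with
    | [] => simp [pvScanAL, pvScanRuns, pvFlush]
    | ch :: rest =>
      have hrest : rest = List.replicate (pvRunLen ch rest) ch ++ rest.drop (pvRunLen ch rest) := by
        conv_lhs => rw [← List.take_append_drop (pvRunLen ch rest) rest]
        rw [take_pvRunLen]
      have hlen : (rest.drop (pvRunLen ch rest)).length ≤ n := by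
        have h1 := List.length_drop (l := rest) (i := pvRunLen ch rest)
        have h2 : rest.length + 1 ≤ n + 1 := by simpa using hcs
        omega
      rw [pvScanRuns]
      by_cases hch : ch = '-'
      · subst hch
        have hstep1 : pvScanAL c (d, false, 0, s) r ('-' :: rest)
            = pvScanAL c (d, true, 1, (r, c)) (r + 1) rest := rfl
        rw [hstep1]
        conv_lhs => rw [hrest]
        rw [scanAL_dashes]
        have ek : (1 : Int) + (pvRunLen '-' rest : Int) = ((pvRunLen '-' rest + 1 : Nat) : Int) := by
          push_cast; ring
        have er : r + 1 + (pvRunLen '-' rest : Int) = r + ((pvRunLen '-' rest + 1 : Nat) : Int) := by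
          push_cast; ring
        rw [ek, er]
        match hdrop : rest.drop (pvRunLen '-' rest) with
        | [] =>
          simp only [pvScanAL, pvFlush, if_true]
          rw [pvScanRuns]
          simp only [beq_self_eq_true, Bool.true_and]
          rw [erase_appendSeg d (pvRunLen '-' rest + 1) (by omega) (r, c)]
          by_cases hk : 1 < pvRunLen '-' rest + 1 <;> simp [hk]
        | ch2 :: t2 =>
          have hne : ch2 ≠ '-' := drop_pvRunLen_ne '-' rest hdrop
          rw [scanAL_flushstep c ch2 hne]
          have := ih (ch2 :: t2) (by rw [← hdrop]; exact hlen) c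
            (r + ((pvRunLen '-' rest + 1 : Nat) : Int)) (pvAppendSeg d ((pvRunLen '-' rest + 1 : Nat) : Int) (r, c)) (r, c)
          rw [this]
          rw [erase_appendSeg d (pvRunLen '-' rest + 1) (by omega) (r, c)]
          simp only [beq_self_eq_true, Bool.true_and]
          by_cases hk : 1 < pvRunLen '-' rest + 1 <;> simp [hk]
      · have hall : ∀ x ∈ List.replicate (pvRunLen ch rest + 1) ch, x ≠ '-' := by
          intro x hx
          rw [List.eq_of_mem_replicate hx]
          exact hch
        have hcons : (ch :: rest) = List.replicate (pvRunLen ch rest + 1) ch ++ rest.drop (pvRunLen ch rest) := by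
          conv_lhs => rw [hrest]
          rw [List.replicate_succ, List.cons_append]
        conv_lhs => rw [hcons]
        rw [scanAL_skip c _ hall]
        have := ih (rest.drop (pvRunLen ch rest)) hlen c
          (r + ((List.replicate (pvRunLen ch rest + 1) ch).length : Int)) d s
        rw [this]
        have hb : (ch == '-') = false := by simp [hch]
        simp only [hb, Bool.false_and, List.length_replicate]
        norm_num

-- A's foldl over range(row) with grid indexing IS the scan of the column character list
lemma range_foldl (cw : List String) (c : Int) :
    ∀ (m k : Nat), k + m = cw.length →
    ∀ st, (PySem.List.pyRange (k : Int) (cw.length : Int) 1).foldl (pvStepA cw c) st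
      = pvScanAL c st (k : Int) ((pvColumn cw c).drop k) := by
  intro m
  induction m with
  | zero =>
    intro k hk st
    have hkl : k = cw.length := by omega
    subst hkl
    have hr : PySem.List.pyRange (cw.length : Int) (cw.length : Int) 1 = [] := by
      simp [PySem.List.pyRange]
    rw [hr]
    have hd : (pvColumn cw c).drop cw.length = [] := by
      apply List.drop_eq_nil_of_le
      simp [pvColumn]
    rw [hd]
    rfl
  | succ m ih =>
    intro k hk st
    have hklt : k < cw.length := by omega
    have hcol : (pvColumn cw c).length = cw.length := by simp [pvColumn]
    rw [PySem.List.pyRange_one_cons (by exact_mod_cast hklt), List.foldl_cons]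
    have e1 : ((k : Int) + 1) = ((k + 1 : Nat) : Int) := by push_cast; ring
    rw [e1, ih (k + 1) (by omega)]
    have hklt' : k < (pvColumn cw c).length := by omega
    rw [List.drop_eq_getElem_cons hklt']
    have hcell : pvCellA cw (k : Int) c = (pvColumn cw c)[k] := by
      have hget : PySem.List.pyGet? cw (k : Int) = some cw[k] := by
        simp [PySem.List.pyGet?, PySem.List.pyIdx?, hklt]
      simp [pvCellA, hget, pvColumn]
    rw [pvScanAL, ← hcell, ← pvStepA_eq, e1]

-- A's column fold with erase 1 is the run-at-a-time fold
lemma cols_foldl (cw : List String) (l : List Int) (d : PySem.Dict Int (List (Int × Int))) :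
    ((l.foldl (fun d c =>
        match (PySem.List.pyRange 0 (cw.length : Int) 1).foldl (pvStepA cw c)
            (d, false, (0 : Int), ((0, 0) : Int × Int)) with
        | (d, found, len, start) => if found then pvAppendSeg d len start else d) d)).erase 1
      = l.foldl (fun d c => pvScanRuns c d 0 (pvColumn cw c)) (d.erase 1) := by
  induction l generalizing d with
  | nil => rfl
  | cons c t ih =>
    simp only [List.foldl_cons]
    rw [ih]
    congr 1
    have h1 : (PySem.List.pyRange 0 (cw.length : Int) 1).foldl (pvStepA cw c)
        (d, false, (0 : Int), ((0, 0) : Int × Int))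
        = pvScanAL c (d, false, (0 : Int), ((0, 0) : Int × Int)) 0 (pvColumn cw c) := by
      have := range_foldl cw c cw.length 0 (by omega) (d, false, (0 : Int), ((0, 0) : Int × Int))
      simpa using this
    rw [h1]
    exact core_column (pvColumn cw c).length (pvColumn cw c) le_rfl c 0 d (0, 0)

-- ========== B-side lemmas ==========

-- downward '-'-run lengths of a column, top-down
def pvUpCol : List Char → List Int
  | [] => []
  | x :: t => (if x = '-' then (pvUpCol t).headD 0 + 1 else 0) :: pvUpCol t

-- the table B's first pass builds, as structural recursion top-down
def pvTab (cols : Int) : List String → List (List Int)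
  | [] => []
  | line :: rest =>
    pvUpRow line cols ((pvTab cols rest).headD (List.replicate cols.toNat 0)) :: pvTab cols rest

-- the up values of a dash run: m, m-1, …, 1
def pvDashVals : Nat → List Int
  | 0 => []
  | m + 1 => ((m + 1 : Nat) : Int) :: pvDashVals m

-- B's collection loop, one row at a time, carrying the previous up value
def pvCollect (c : Int) (d : PySem.Dict Int (List (Int × Int))) (r : Int) (us : List Int) (p : Int) :
    PySem.Dict Int (List (Int × Int)) :=
  match us with
  | [] => d
  | u :: rest =>
    let d' := if 1 < u ∧ (r = 0 ∨ p = 0) then d.modify u [] (fun l => l ++ [(r, c)]) else d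
    pvCollect c d' (r + 1) rest u

lemma tab_fold (cols : Int) (ls : List String) :
    ls.reverse.foldl (fun (st : List Int × List (List Int)) line =>
        let u := pvUpRow line cols st.1
        (u, st.2 ++ [u])) (List.replicate cols.toNat 0, ([] : List (List Int)))
      = ((pvTab cols ls).headD (List.replicate cols.toNat 0), (pvTab cols ls).reverse) := by
  induction ls with
  | nil => simp [pvTab]
  | cons line rest ih =>
    rw [List.reverse_cons, List.foldl_append, ih]
    simp [pvTab]

lemma lk1_replicate (n : Nat) (c : Int) : pvLk1 (List.replicate n (0 : Int)) c = 0 := by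
  unfold pvLk1
  simp only [PySem.List.pyGetD, PySem.List.pyGet?, PySem.List.pyIdx?]
  split_ifs <;> simp

lemma lk_upRow (line : String) (cols : Int) (up : List Int) (c : Int) (h0 : 0 ≤ c) (hc : c < cols) :
    pvLk1 (pvUpRow line cols up) c
      = if (PySem.Str.pyGet? line c).getD ' ' == '-' then pvLk1 up c + 1 else 0 := by
  unfold pvLk1 pvUpRow
  exact PySem.List.pyGetD_map_pyRange_of_nonneg _ _ _ _ h0 hc

lemma upCol_length (cs : List Char) : (pvUpCol cs).length = cs.length := by
  induction cs with
  | nil => rfl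
  | cons x t ih => simp [pvUpCol, ih]

lemma upCol_head_zero (cs : List Char) (h : ∀ x, cs.head? = some x → x ≠ '-') :
    (pvUpCol cs).headD 0 = 0 := by
  cases cs with
  | nil => rfl
  | cons x t => simp [pvUpCol, h x rfl]

lemma tab_head (cols : Int) (ls : List String) (c : Int) (h0 : 0 ≤ c) (hc : c < cols) :
    pvLk1 ((pvTab cols ls).headD (List.replicate cols.toNat 0)) c
      = (pvUpCol (pvColumn ls c)).headD 0 := by
  induction ls with
  | nil => simp [pvTab, pvColumn, pvUpCol, lk1_replicate]
  | cons line rest ih =>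
    rw [pvTab]
    simp only [List.headD_cons]
    rw [lk_upRow line cols _ c h0 hc, ih]
    simp only [pvColumn, List.map_cons, pvUpCol, List.headD_cons]
    by_cases h : (PySem.Str.pyGet? line c).getD ' ' = '-' <;> simp

lemma tab_elem (cols : Int) (ls : List String) (r : Nat) (hr : r < ls.length)
    (c : Int) (h0 : 0 ≤ c) (hc : c < cols) :
    pvLk (pvTab cols ls) (r : Int) c = (pvUpCol (pvColumn ls c)).getD r 0 := by
  induction ls generalizing r with
  | nil => simp at hr
  | cons line rest ih =>
    cases r with
    | zero =>
      have hlk : pvLk (pvTab cols (line :: rest)) ((0 : Nat) : Int) c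
          = pvLk1 (pvUpRow line cols ((pvTab cols rest).headD (List.replicate cols.toNat 0))) c := by
        unfold pvLk pvTab
        rw [show (((0 : Nat) : Int)) = (0 : Int) by norm_num, PySem.List.pyGetD_zero_cons]
        cases rest <;> rfl
      rw [hlk, lk_upRow line cols _ c h0 hc, tab_head cols rest c h0 hc]
      simp only [pvColumn, List.map_cons, pvUpCol, List.getD_cons_zero]
      by_cases h : (PySem.Str.pyGet? line c).getD ' ' = '-' <;> simp
    | succ r =>
      have hlk : pvLk (pvTab cols (line :: rest)) ((r + 1 : Nat) : Int) c
          = pvLk (pvTab cols rest) (r : Int) c := by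
        unfold pvLk pvTab
        rw [PySem.List.pyGetD_natCast, PySem.List.pyGetD_natCast, List.getD_cons_succ]
        cases rest <;> rfl
      rw [hlk, ih r (by simpa using Nat.lt_of_succ_lt_succ hr)]
      simp [pvColumn, pvUpCol]

lemma collect_foldl (table : List (List Int)) (c : Int) (us : List Int) (n : Nat)
    (hlen : us.length = n) (H : ∀ r : Nat, r < n → pvLk table (r : Int) c = us.getD r 0) :
    ∀ (m k : Nat), k + m = n → ∀ d,
    (PySem.List.pyRange (k : Int) (n : Int) 1).foldl (pvBodyB table c) d
      = pvCollect c d (k : Int) (us.drop k) (pvLk table ((k : Int) - 1) c) := by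
  intro m
  induction m with
  | zero =>
    intro k hk d
    have hkn : k = n := by omega
    subst hkn
    rw [PySem.List.pyRange_one_eq_nil (by omega), List.drop_eq_nil_of_le (by omega)]
    rfl
  | succ m ih =>
    intro k hk d
    have hklt : k < n := by omega
    rw [PySem.List.pyRange_one_cons (by exact_mod_cast hklt), List.foldl_cons]
    have e1 : ((k : Int) + 1) = ((k + 1 : Nat) : Int) := by push_cast; ring
    rw [e1, ih (k + 1) (by omega)]
    have hk' : k < us.length := by omega
    rw [List.drop_eq_getElem_cons hk']
    have hu : us[k] = pvLk table (k : Int) c := by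
      rw [H k hklt, List.getD_eq_getElem?_getD, List.getElem?_eq_getElem hk']
      rfl
    rw [pvCollect]
    simp only [pvBodyB, ← hu]
    have e2 : ((k + 1 : Nat) : Int) - 1 = (k : Int) := by push_cast; ring
    rw [e2, hu]
    rfl

lemma upCol_dash (rest : List Char) (h : (pvUpCol rest).headD 0 = 0) (m : Nat) :
    pvUpCol (List.replicate m '-' ++ rest) = pvDashVals m ++ pvUpCol rest ∧
    (pvUpCol (List.replicate m '-' ++ rest)).headD 0 = (m : Int) := by
  induction m with
  | zero =>
    refine ⟨?_, by simpa using h⟩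
    rw [show pvDashVals 0 = [] from rfl]
    simp
  | succ m ih =>
    have h3 : (pvDashVals m ++ pvUpCol rest).headD 0 = (m : Int) := by
      rw [← ih.1]; exact ih.2
    have h2 : pvUpCol (List.replicate (m + 1) '-' ++ rest)
        = ((m : Int) + 1) :: (pvDashVals m ++ pvUpCol rest) := by
      rw [List.replicate_succ, List.cons_append, pvUpCol, ih.1, h3]
      simp
    constructor
    · rw [h2, show pvDashVals (m + 1) = ((m + 1 : Nat) : Int) :: pvDashVals m from rfl,
        List.cons_append]
      norm_cast
    · rw [h2]
      norm_cast

lemma upCol_nondash (x : Char) (hx : x ≠ '-') (rest : List Char) (m : Nat) :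
    pvUpCol (List.replicate m x ++ rest) = List.replicate m (0 : Int) ++ pvUpCol rest := by
  induction m with
  | zero => simp
  | succ m ih =>
    rw [List.replicate_succ, List.cons_append, pvUpCol, ih, List.replicate_succ, List.cons_append]
    simp [hx]

lemma collect_skip_dash (c : Int) : ∀ (j : Nat) (us : List Int)
    (d : PySem.Dict Int (List (Int × Int))) (r p : Int), 0 < r → p ≠ 0 →
    pvCollect c d r (pvDashVals j ++ us) p
      = pvCollect c d (r + (j : Nat)) us (if j = 0 then p else 1) := by
  intro j
  induction j with
  | zero => intro us d r p _ _; simp [pvDashVals]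
  | succ j ih =>
    intro us d r p hr hp
    rw [show pvDashVals (j + 1) = ((j + 1 : Nat) : Int) :: pvDashVals j from rfl,
      List.cons_append, pvCollect]
    have hcond : ¬ (1 < ((j + 1 : Nat) : Int) ∧ (r = 0 ∨ p = 0)) := by
      rintro ⟨-, h | h⟩ <;> omega
    simp only [hcond, if_false]
    rw [ih us d (r + 1) _ (by omega) (by push_cast; omega)]
    have e : r + 1 + (j : Int) = r + ((j + 1 : Nat) : Int) := by push_cast; ring
    rw [e]
    by_cases hj : j = 0
    · subst hj; norm_num
    · simp [hj]

lemma collect_skip_zeros (c : Int) : ∀ (j : Nat) (us : List Int)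
    (d : PySem.Dict Int (List (Int × Int))) (r p : Int),
    pvCollect c d r (List.replicate j (0 : Int) ++ us) p
      = pvCollect c d (r + (j : Nat)) us (if j = 0 then p else 0) := by
  intro j
  induction j with
  | zero => intro us d r p; simp
  | succ j ih =>
    intro us d r p
    rw [List.replicate_succ, List.cons_append, pvCollect]
    have hcond : ¬ ((1 : Int) < 0 ∧ (r = 0 ∨ p = 0)) := by rintro ⟨h, -⟩; omega
    simp only [hcond, if_false]
    rw [ih us d (r + 1) 0]
    have e : r + 1 + (j : Int) = r + ((j + 1 : Nat) : Int) := by push_cast; ring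
    rw [e]
    by_cases hj : j = 0
    · subst hj; norm_num
    · simp [hj]

lemma collect_eq_scanRuns (c : Int) : ∀ (n : Nat) (cs : List Char), cs.length ≤ n →
    ∀ (d : PySem.Dict Int (List (Int × Int))) (r p : Int), 0 ≤ r →
    (r = 0 ∨ p = 0 ∨ (∀ x, cs.head? = some x → x ≠ '-')) →
    pvCollect c d r (pvUpCol cs) p = pvScanRuns c d r cs := by
  intro n
  induction n with
  | zero =>
    intro cs hcs d r p _ _
    have hnil : cs = [] := List.eq_nil_of_length_eq_zero (Nat.le_zero.mp hcs)
    subst hnil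
    simp [pvUpCol, pvCollect, pvScanRuns]
  | succ n ih =>
    intro cs hcs d r p hr hG
    match cs with
    | [] => simp [pvUpCol, pvCollect, pvScanRuns]
    | ch :: rest =>
      have hrest : rest = List.replicate (pvRunLen ch rest) ch ++ rest.drop (pvRunLen ch rest) := by
        conv_lhs => rw [← List.take_append_drop (pvRunLen ch rest) rest]
        rw [take_pvRunLen]
      have hlen : (rest.drop (pvRunLen ch rest)).length ≤ n := by
        have h1 := List.length_drop (l := rest) (i := pvRunLen ch rest)
        have h2 : rest.length + 1 ≤ n + 1 := by simpa using hcs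
        omega
      have hcons : (ch :: rest)
          = List.replicate (pvRunLen ch rest + 1) ch ++ rest.drop (pvRunLen ch rest) := by
        conv_lhs => rw [hrest]
        rw [List.replicate_succ, List.cons_append]
      rw [pvScanRuns]
      set k : Nat := pvRunLen ch rest + 1 with hkdef
      have hdropk : rest.drop (k - 1) = rest.drop (pvRunLen ch rest) := by
        simp [hkdef]
      by_cases hch : ch = '-'
      · subst hch
        have hhz : (pvUpCol (rest.drop (pvRunLen '-' rest))).headD 0 = 0 := by
          apply upCol_head_zero
          intro x hx
          match hdd : rest.drop (pvRunLen '-' rest) with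
          | [] => rw [hdd] at hx; simp at hx
          | y :: t =>
            rw [hdd] at hx
            simp at hx
            rw [← hx]
            exact drop_pvRunLen_ne '-' rest hdd
        have hud := upCol_dash (rest.drop (pvRunLen '-' rest)) hhz k
        conv_lhs => rw [hcons, hud.1]
        have hkd : pvDashVals k = ((k : Nat) : Int) :: pvDashVals (pvRunLen '-' rest) := by
          rw [hkdef]; rfl
        rw [hkd, List.cons_append, pvCollect]
        have hG' : r = 0 ∨ p = 0 := by
          rcases hG with h | h | h
          · exact Or.inl h
          · exact Or.inr h
          · exact absurd rfl (h '-' rfl)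
        have hcond : (1 < ((k : Nat) : Int) ∧ (r = 0 ∨ p = 0)) ↔ 1 < k := by
          constructor
          · rintro ⟨h, -⟩; exact_mod_cast h
          · intro h; exact ⟨by exact_mod_cast h, hG'⟩
        have hifs : (if 1 < ((k : Nat) : Int) ∧ (r = 0 ∨ p = 0) then
              d.modify ((k : Nat) : Int) [] (fun l => l ++ [(r, c)]) else d)
            = (if ('-' == '-') && decide (1 < k) then
                d.modify ((k : Nat) : Int) [] (fun l => l ++ [(r, c)]) else d) := by
          by_cases hk1 : 1 < k
          · rw [if_pos (hcond.mpr hk1), if_pos (by simp [hk1])]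
          · rw [if_neg (fun hx => hk1 (hcond.mp hx)), if_neg (by simp [hk1])]
        rw [hifs]
        set d' := if ('-' == '-') && decide (1 < k) then
            d.modify ((k : Nat) : Int) [] (fun l => l ++ [(r, c)]) else d with hd'
        rw [collect_skip_dash c (pvRunLen '-' rest) _ d' (r + 1) _ (by omega)
          (by rw [hkdef]; push_cast; omega)]
        have e : r + 1 + ((pvRunLen '-' rest : Nat) : Int) = r + ((k : Nat) : Int) := by
          rw [hkdef]; push_cast; ring
        rw [e, hdropk]
        apply ih (rest.drop (pvRunLen '-' rest)) hlen d' (r + ((k : Nat) : Int)) _ (by positivity)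
        refine Or.inr (Or.inr ?_)
        intro x hx
        match hdd : rest.drop (pvRunLen '-' rest) with
        | [] => rw [hdd] at hx; simp at hx
        | y :: t =>
          rw [hdd] at hx
          simp at hx
          rw [← hx]
          exact drop_pvRunLen_ne '-' rest hdd
      · have hb : (ch == '-') = false := by simp [hch]
        simp only [hb, Bool.false_and, Bool.false_eq_true, if_false]
        conv_lhs => rw [hcons, upCol_nondash ch hch _ k, collect_skip_zeros]
        have hk0 : ¬ (k = 0) := by rw [hkdef]; omega
        rw [if_neg hk0, hdropk]
        exact ih (rest.drop (pvRunLen ch rest)) hlen d _ 0 (by positivity) (Or.inr (Or.inl rfl))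

lemma altB_eq (cw : List String) :
    findVertical_alt cw
      = ((PySem.List.pyRange 0 (PySem.Str.len ((PySem.List.pyGet? cw 0).getD "")) 1).foldl
          (fun d c => pvScanRuns c d 0 (pvColumn cw c)) PySem.Dict.empty).items := by
  unfold findVertical_alt
  simp only []
  rw [tab_fold]
  simp only [List.reverse_reverse]
  congr 1
  apply PySem.List.foldl_congr_mem
  intro d c hc
  set cols : Int := PySem.Str.len ((PySem.List.pyGet? cw 0).getD "") with hcols
  obtain ⟨hc0, hclt⟩ := (PySem.List.mem_pyRange_one).mp hc
  have hlen : (pvUpCol (pvColumn cw c)).length = cw.length := by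
    rw [upCol_length]; simp [pvColumn]
  have H : ∀ r : Nat, r < cw.length →
      pvLk (pvTab cols cw) (r : Int) c = (pvUpCol (pvColumn cw c)).getD r 0 :=
    fun r hr => tab_elem cols cw r hr c hc0 hclt
  have h1 := collect_foldl (pvTab cols cw) c (pvUpCol (pvColumn cw c)) cw.length hlen H
    cw.length 0 (by omega) d
  rw [show (((0 : Nat) : Int)) = (0 : Int) from rfl] at h1
  rw [h1, List.drop_zero]
  exact collect_eq_scanRuns c (pvColumn cw c).length (pvColumn cw c) le_rfl d 0 _ le_rfl
    (Or.inl rfl)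

-- ===== VERDICT (by name: the statement is the Claim_ definition above) =====
theorem findVertical_spec : Claim_equal_findVertical := by
  intro cw _ _
  show findVertical cw = findVertical_alt cw
  rw [altB_eq]
  unfold findVertical
  simp only []
  set dA := ((PySem.List.pyRange 0 (PySem.Str.len ((PySem.List.pyGet? cw 0).getD "")) 1).foldl
    (fun d c =>
      match (PySem.List.pyRange 0 ((cw.length : Int)) 1).foldl (pvStepA cw c)
          (d, false, (0 : Int), ((0, 0) : Int × Int)) with
      | (d, found, len, start) => if found then pvAppendSeg d len start else d)
    PySem.Dict.empty) with hdA
  have hB := cols_foldl cw (PySem.List.pyRange 0 (PySem.Str.len ((PySem.List.pyGet? cw 0).getD "")) 1)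
    PySem.Dict.empty
  rw [← hdA] at hB
  by_cases hc : dA.contains 1
  · rw [if_pos hc, hB]
    rfl
  · rw [if_neg hc, ← erase_of_not_contains dA (by simpa using hc), hB]
    rfl
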